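-- pv_equiv track=rewrite | github.com/chenweng1991/smart-seq | scripts/design_11bp_tags.py | worst_primer_adapter_complement
-- ===== SOURCE A (Python) =====
-- TSO_PREFIX = "AGAGACAG"
--
-- FWD_PREFIX = "TCGTCGGCAGCGTCAGATGTGTATAAGAGACAG"
--
-- REVERSE_PCR_PRIMER = "ACGAGCATCAGCAGCATACGA"
--
-- NEXTERA_READ2_PARTIAL = "CTGTCTCTTATACACATCTCCGAGCCCACGAGAC"
--
-- def reverse_complement(seq: str) -> str:
--     table = str.maketrans("ACGT", "TGCA")
--     return seq.translate(table)[::-1]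
--
-- def longest_common_substring(left: str, right: str) -> int:
--     best = 0
--     lengths = [[0] * (len(right) + 1) for _ in range(len(left) + 1)]
--     for i, left_base in enumerate(left, start=1):
--         for j, right_base in enumerate(right, start=1):
--             if left_base == right_base:
--                 lengths[i][j] = lengths[i - 1][j - 1] + 1
--                 best = max(best, lengths[i][j])
--     return best
--
-- def longest_complement_run(left: str, right: str) -> int:
--     return longest_common_substring(left, reverse_complement(right))
--
-- def worst_primer_adapter_complement(seq: str) -> tuple[int, str]:
--     checks = {
--         "reverse_pcr_primer": REVERSE_PCR_PRIMER,
--         "forward_pcr_prefix": FWD_PREFIX,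
--         "tso_prefix": TSO_PREFIX,
--         "nextera_read2_partial": NEXTERA_READ2_PARTIAL,
--     }
--     scored = [
--         (longest_complement_run(seq, reference), name)
--         for name, reference in checks.items()
--     ]
--     return max(scored)
-- ===== SOURCE B (Python) =====
-- TSO_PREFIX = "AGAGACAG"
--
-- FWD_PREFIX = "TCGTCGGCAGCGTCAGATGTGTATAAGAGACAG"
--
-- REVERSE_PCR_PRIMER = "ACGAGCATCAGCAGCATACGA"
--
-- NEXTERA_READ2_PARTIAL = "CTGTCTCTTATACACATCTCCGAGCCCACGAGAC"
--
--
-- def reverse_complement(seq: str) -> str: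
--     table = str.maketrans("ACGT", "TGCA")
--     return seq.translate(table)[::-1]
--
--
-- def longest_common_substring(left: str, right: str) -> int:
--     # Diagonal sweep: for each alignment offset keep a single run counter
--     # instead of the full DP matrix.
--     best = 0
--     for d in range(1 - len(right), len(left)):
--         run = 0
--         for j in range(len(right)):
--             i = d + j
--             if 0 <= i < len(left) and left[i] == right[j]:
--                 run += 1
--                 best = max(best, run)
--             else:
--                 run = 0
--     return best
--
--
-- def longest_complement_run(left: str, right: str) -> int:
--     return longest_common_substring(left, reverse_complement(right))
--
--
-- def worst_primer_adapter_complement(seq: str) -> tuple[int, str]: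
--     checks = {
--         "reverse_pcr_primer": REVERSE_PCR_PRIMER,
--         "forward_pcr_prefix": FWD_PREFIX,
--         "tso_prefix": TSO_PREFIX,
--         "nextera_read2_partial": NEXTERA_READ2_PARTIAL,
--     }
--     scored = [
--         (longest_complement_run(seq, reference), name)
--         for name, reference in checks.items()
--     ]
--     return max(scored)
-- ===== Notes on version B (the rewrite author's own statement) =====
-- stated objective: alternative
-- what changed: longest_common_substring's (n+1)x(m+1) DP table is replaced by a diagonal sweep that keeps only a scalar run counter per alignment offset; reverse_complement, the four reference constants and the max((score,name)) tie-break are unchanged.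
import Mathlib
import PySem

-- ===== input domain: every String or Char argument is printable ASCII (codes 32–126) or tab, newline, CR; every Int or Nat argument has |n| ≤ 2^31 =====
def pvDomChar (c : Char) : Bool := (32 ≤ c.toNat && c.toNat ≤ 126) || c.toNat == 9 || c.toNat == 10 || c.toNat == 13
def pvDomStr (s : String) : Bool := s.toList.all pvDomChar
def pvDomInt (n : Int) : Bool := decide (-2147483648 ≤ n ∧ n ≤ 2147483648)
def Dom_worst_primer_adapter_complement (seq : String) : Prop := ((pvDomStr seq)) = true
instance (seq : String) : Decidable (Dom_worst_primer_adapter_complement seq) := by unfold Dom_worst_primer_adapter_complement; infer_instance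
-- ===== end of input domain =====

-- B replaces the DP matrix of longest_common_substring by a per-diagonal run counter
-- (objective: alternative — O(1) extra space instead of the (n+1)×(m+1) table; same output).

-- shared module constants (unchanged between A and B)
def TSO_PREFIX : String := "AGAGACAG"
def FWD_PREFIX : String := "TCGTCGGCAGCGTCAGATGTGTATAAGAGACAG"
def REVERSE_PCR_PRIMER : String := "ACGAGCATCAGCAGCATACGA"
def NEXTERA_READ2_PARTIAL : String := "CTGTCTCTTATACACATCTCCGAGCCCACGAGAC"

-- shared helper reverse_complement (identical in Source A and Source B):
-- str.maketrans("ACGT","TGCA") + translate = pointwise map (exact: other chars unchanged), then [::-1]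
def pvCompBase (c : Char) : Char :=
  if c = 'A' then 'T' else if c = 'C' then 'G' else if c = 'G' then 'C' else if c = 'T' then 'A' else c
def reverse_complement (s : List Char) : List Char := (s.map pvCompBase).reverse

def pvChecks : List (String × String) :=
  [("reverse_pcr_primer", REVERSE_PCR_PRIMER),
   ("forward_pcr_prefix", FWD_PREFIX),
   ("tso_prefix", TSO_PREFIX),
   ("nextera_read2_partial", NEXTERA_READ2_PARTIAL)]

-- ===== PORT A =====
-- longest_common_substring of Source A: full (n+1)×(m+1) DP matrix `lengths`,
-- enumerate(left/right, start=1) rendered as a fold over the 0-based index ranges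
-- (indices are always in range, so getD is exact).
def lcsA (left right : List Char) : Int :=
  let init : List (List Int) :=
    List.replicate (left.length + 1) (List.replicate (right.length + 1) 0)
  ((List.range left.length).foldl (fun (st : Int × List (List Int)) i =>
      (List.range right.length).foldl (fun (st : Int × List (List Int)) j =>
        if left.getD i ' ' = right.getD j ' ' then
          let v := (st.2.getD i []).getD j 0 + 1
          (max st.1 v, st.2.set (i+1) ((st.2.getD (i+1) []).set (j+1) v))
        else st) st) (0, init)).1

def worst_primer_adapter_complement (seq : String) : Int × String :=
  let scored := pvChecks.map (fun p => (lcsA seq.toList (reverse_complement p.2.toList), p.1))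
  -- max(scored): tuple order = Int then String; scored is a 4-element literal, so never none
  (PySem.List.max2? scored (fun x => x.1) (fun x => x.2)).getD (0, "")

-- ===== PORT B =====
-- longest_common_substring of Source B: diagonal sweep, scalar run counter per offset d.
def lcsB (left right : List Char) : Int :=
  (PySem.List.pyRange (1 - (right.length : Int)) (left.length : Int) 1).foldl
    (fun best d =>
      ((List.range right.length).foldl (fun (st : Int × Int) (j : Nat) =>
          let i : Int := d + (j : Int)
          if 0 ≤ i ∧ i < (left.length : Int) ∧ left.getD i.toNat ' ' = right.getD j ' ' then
            (max st.1 (st.2 + 1), st.2 + 1)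
          else (st.1, 0)) (best, 0)).1)
    0

def worst_primer_adapter_complement_alt (seq : String) : Int × String :=
  let scored := pvChecks.map (fun p => (lcsB seq.toList (reverse_complement p.2.toList), p.1))
  (PySem.List.max2? scored (fun x => x.1) (fun x => x.2)).getD (0, "")

-- ===== PRECONDITION & SPEC =====
def Spec_worst_primer_adapter_complement (seq : String) (out : Int × String) : Prop := out = worst_primer_adapter_complement_alt seq
instance (seq : String) (out : Int × String) : Decidable (Spec_worst_primer_adapter_complement seq out) := by unfold Spec_worst_primer_adapter_complement; infer_instance

-- ===== CLAIM (what is proved, stated in full; the proofs are below) =====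
def Claim_equal_worst_primer_adapter_complement : Prop := ∀ (seq : String), Dom_worst_primer_adapter_complement seq → Spec_worst_primer_adapter_complement seq (worst_primer_adapter_complement seq)

-- ===== LEMMAS AND PROOFS =====

-- runLen l r i j: length of the run of matching characters ending at 1-based cell (i, j);
-- this is exactly what A's lengths[i][j] stores and what B's run counter holds on a diagonal.
def runLen (l r : List Char) : Nat → Nat → Int
  | 0, _ => 0
  | _+1, 0 => 0
  | i+1, j+1 => if l.getD i ' ' = r.getD j ' ' then runLen l r i j + 1 else 0

theorem runLen_zero_right (l r : List Char) (i : Nat) : runLen l r i 0 = 0 := by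
  cases i <;> rfl

theorem runLen_succ (l r : List Char) (i j : Nat) :
    runLen l r (i+1) (j+1) =
      (if l.getD i ' ' = r.getD j ' ' then runLen l r i j + 1 else 0) := rfl

-- characterization of the longest-common-substring value shared by both ports
def IsLCS (l r : List Char) (X : Int) : Prop :=
  0 ≤ X ∧
  (∀ i j, i < l.length → j < r.length → runLen l r (i+1) (j+1) ≤ X) ∧
  (X = 0 ∨ ∃ i j, i < l.length ∧ j < r.length ∧ X = runLen l r (i+1) (j+1))

theorem IsLCS_unique {l r : List Char} {X Y : Int} (hX : IsLCS l r X) (hY : IsLCS l r Y) : X = Y := by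
  obtain ⟨hX0, hXub, hXatt⟩ := hX
  obtain ⟨hY0, hYub, hYatt⟩ := hY
  rcases hXatt with hX' | ⟨i, j, hi, hj, hX'⟩ <;> rcases hYatt with hY' | ⟨i', j', hi', hj', hY'⟩
  · omega
  · have := hXub i' j' hi' hj'; omega
  · have := hYub i j hi hj; omega
  · have h1 := hXub i' j' hi' hj'
    have h2 := hYub i j hi hj
    omega

-- ===== A-side proofs =====

def stepA (l r : List Char) (i : Nat) (st : Int × List (List Int)) (j : Nat) : Int × List (List Int) :=
  if l.getD i ' ' = r.getD j ' ' then
    (max st.1 ((st.2.getD i []).getD j 0 + 1),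
     st.2.set (i+1) ((st.2.getD (i+1) []).set (j+1) ((st.2.getD i []).getD j 0 + 1)))
  else st

def initA (l r : List Char) : List (List Int) :=
  List.replicate (l.length + 1) (List.replicate (r.length + 1) 0)

theorem lcsA_unfold (l r : List Char) :
    lcsA l r = ((List.range l.length).foldl
      (fun st i => (List.range r.length).foldl (stepA l r i) st) (0, initA l r)).1 := rfl

def Shape (l r : List Char) (mat : List (List Int)) : Prop :=
  mat.length = l.length + 1 ∧ ∀ row ∈ mat, row.length = r.length + 1

def MatFull (l r : List Char) (mat : List (List Int)) (i : Nat) : Prop :=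
  ∀ a b, a ≤ l.length → b ≤ r.length →
    (mat.getD a []).getD b 0 = (if a ≤ i then runLen l r a b else 0)

def MatPart (l r : List Char) (mat : List (List Int)) (i j : Nat) : Prop :=
  ∀ a b, a ≤ l.length → b ≤ r.length →
    (mat.getD a []).getD b 0 = (if a ≤ i ∨ (a = i + 1 ∧ b ≤ j) then runLen l r a b else 0)

theorem getD_set_self {α : Type} (L : List α) (k : Nat) (x d : α) (h : k < L.length) :
    (L.set k x).getD k d = x := by
  rw [List.getD_eq_getElem?_getD, List.getElem?_set_self h]
  rfl

theorem getD_set_ne {α : Type} (L : List α) (k a : Nat) (x d : α) (h : k ≠ a) :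
    (L.set k x).getD a d = L.getD a d := by
  rw [List.getD_eq_getElem?_getD, List.getElem?_set_ne h, ← List.getD_eq_getElem?_getD]

theorem getD_mem {α : Type} (L : List α) (a : Nat) (d : α) (h : a < L.length) :
    L.getD a d ∈ L := by
  rw [List.getD_eq_getElem?_getD, List.getElem?_eq_getElem h]
  exact List.getElem_mem h

theorem matFull_matPart {l r : List Char} {mat : List (List Int)} {i : Nat}
    (h : MatFull l r mat i) : MatPart l r mat i 0 := by
  intro a b ha hb
  rw [h a b ha hb]
  by_cases hai : a ≤ i
  · rw [if_pos hai, if_pos (Or.inl hai)]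
  · by_cases h' : a = i + 1 ∧ b ≤ 0
    · rw [if_neg hai, if_pos (Or.inr h')]
      have hb0 : b = 0 := by omega
      rw [hb0, runLen_zero_right]
    · rw [if_neg hai, if_neg (by tauto)]

theorem matPart_matFull {l r : List Char} {mat : List (List Int)} {i : Nat}
    (h : MatPart l r mat i r.length) : MatFull l r mat (i+1) := by
  intro a b ha hb
  rw [h a b ha hb]
  by_cases h' : a ≤ i + 1
  · rw [if_pos h', if_pos (by omega)]
  · rw [if_neg h', if_neg (by omega)]

theorem A_inner (l r : List Char) (i : Nat) (hi : i < l.length)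
    (b0 : Int) (mat0 : List (List Int)) (hb0 : 0 ≤ b0)
    (hsh : Shape l r mat0) (hmf : MatFull l r mat0 i) :
    ∀ j, j ≤ r.length →
      (Shape l r ((List.range j).foldl (stepA l r i) (b0, mat0)).2) ∧
      (MatPart l r ((List.range j).foldl (stepA l r i) (b0, mat0)).2 i j) ∧
      b0 ≤ ((List.range j).foldl (stepA l r i) (b0, mat0)).1 ∧
      (∀ b, b < j → runLen l r (i+1) (b+1) ≤ ((List.range j).foldl (stepA l r i) (b0, mat0)).1) ∧
      (((List.range j).foldl (stepA l r i) (b0, mat0)).1 = b0 ∨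
        ∃ b, b < j ∧ ((List.range j).foldl (stepA l r i) (b0, mat0)).1 = runLen l r (i+1) (b+1)) := by
  intro j
  induction j with
  | zero =>
    intro _
    simp only [List.range_zero, List.foldl_nil]
    refine ⟨hsh, matFull_matPart hmf, le_refl _, ?_, Or.inl (by trivial)⟩
    intro b hb
    exact absurd hb (by omega)
  | succ j ih =>
    intro hj1
    have hjm : j < r.length := by omega
    obtain ⟨ISH, IMP, IMO, ILB, IATT⟩ := ih (by omega)
    set st := (List.range j).foldl (stepA l r i) (b0, mat0) with hst
    rw [List.range_succ, List.foldl_append, List.foldl_cons, List.foldl_nil]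
    have hval : (st.2.getD i []).getD j 0 = runLen l r i j := by
      rw [IMP i j (by omega) (by omega), if_pos (Or.inl (le_refl i))]
    by_cases hc : l.getD i ' ' = r.getD j ' '
    · -- match branch
      have hrun : runLen l r i j + 1 = runLen l r (i+1) (j+1) := by
        rw [runLen_succ, if_pos hc]
      have hstep : stepA l r i st j =
          (max st.1 (runLen l r i j + 1),
           st.2.set (i+1) ((st.2.getD (i+1) []).set (j+1) (runLen l r i j + 1))) := by
        simp only [stepA]
        rw [if_pos hc, hval]
      rw [hstep]
      dsimp only
      have hlen : st.2.length = l.length + 1 := ISH.1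
      have hi1 : i + 1 < st.2.length := by omega
      have hrow : (st.2.getD (i+1) []).length = r.length + 1 :=
        ISH.2 _ (getD_mem st.2 (i+1) [] hi1)
      refine ⟨⟨?_, ?_⟩, ?_, ?_, ?_, ?_⟩
      · rw [List.length_set]; exact hlen
      · intro row hrow'
        rcases List.mem_or_eq_of_mem_set hrow' with h' | h'
        · exact ISH.2 _ h'
        · rw [h', List.length_set]; exact hrow
      · -- MatPart i (j+1)
        intro a b ha hb
        by_cases hai1 : a = i + 1
        · subst hai1
          rw [getD_set_self _ _ _ _ hi1]
          by_cases hbj1 : b = j + 1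
          · subst hbj1
            rw [getD_set_self _ _ _ _ (by omega), hrun, if_pos (by omega)]
          · rw [getD_set_ne _ _ _ _ _ (fun h => hbj1 h.symm),
              IMP (i+1) b (by omega) hb]
            by_cases hbj : b ≤ j
            · rw [if_pos (by omega), if_pos (by omega)]
            · rw [if_neg (by omega), if_neg (by omega)]
        · rw [getD_set_ne _ _ _ _ _ (fun h => hai1 h.symm), IMP a b ha hb]
          by_cases hai : a ≤ i
          · rw [if_pos (Or.inl hai), if_pos (Or.inl hai)]
          · rw [if_neg (by omega), if_neg (by omega)]
      · exact le_trans IMO (le_max_left _ _)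
      · intro b hb
        by_cases hbj : b < j
        · exact le_trans (ILB b hbj) (le_max_left _ _)
        · have hbj' : b = j := by omega
          rw [hbj', ← hrun]
          exact le_max_right _ _
      · rcases max_choice st.1 (runLen l r i j + 1) with h' | h'
        · rw [h']
          rcases IATT with h'' | ⟨b, hb, h''⟩
          · exact Or.inl h''
          · exact Or.inr ⟨b, by omega, h''⟩
        · rw [h', hrun]
          exact Or.inr ⟨j, by omega, rfl⟩
    · -- mismatch branch
      have hstep : stepA l r i st j = st := by
        simp only [stepA]
        rw [if_neg hc]
      rw [hstep]
      have hrun0 : runLen l r (i+1) (j+1) = 0 := by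
        rw [runLen_succ, if_neg hc]
      refine ⟨ISH, ?_, IMO, ?_, ?_⟩
      · intro a b ha hb
        rw [IMP a b ha hb]
        by_cases hai : a ≤ i
        · rw [if_pos (Or.inl hai), if_pos (Or.inl hai)]
        · by_cases hai1 : a = i + 1
          · subst hai1
            by_cases hbj : b ≤ j
            · rw [if_pos (by omega), if_pos (by omega)]
            · by_cases hbj1 : b = j + 1
              · rw [if_neg (by omega), if_pos (by omega), hbj1, hrun0]
              · rw [if_neg (by omega), if_neg (by omega)]
          · rw [if_neg (by omega), if_neg (by omega)]
      · intro b hb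
        by_cases hbj : b < j
        · exact ILB b hbj
        · have hbj' : b = j := by omega
          rw [hbj', hrun0]
          exact le_trans hb0 IMO
      · rcases IATT with h' | ⟨b, hb, h'⟩
        · exact Or.inl h'
        · exact Or.inr ⟨b, by omega, h'⟩

theorem initA_shape (l r : List Char) : Shape l r (initA l r) := by
  constructor
  · simp [initA]
  · intro row hrow
    rw [List.eq_of_mem_replicate hrow]
    simp

theorem initA_matFull (l r : List Char) : MatFull l r (initA l r) 0 := by
  intro a b ha hb
  have h1 : (initA l r).getD a [] = List.replicate (r.length + 1) (0 : Int) := by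
    rw [initA, List.getD_eq_getElem?_getD, List.getElem?_replicate,
      if_pos (by omega : a < l.length + 1)]
    rfl
  have h2 : (List.replicate (r.length + 1) (0 : Int)).getD b 0 = 0 := by
    rw [List.getD_eq_getElem?_getD, List.getElem?_replicate]
    split <;> rfl
  rw [h1, h2]
  by_cases ha0 : a ≤ 0
  · have ha' : a = 0 := by omega
    rw [if_pos ha0, ha']
    rfl
  · rw [if_neg ha0]

theorem A_outer (l r : List Char) :
    ∀ i, i ≤ l.length →
      (Shape l r ((List.range i).foldl
        (fun st i' => (List.range r.length).foldl (stepA l r i') st) (0, initA l r)).2) ∧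
      (MatFull l r ((List.range i).foldl
        (fun st i' => (List.range r.length).foldl (stepA l r i') st) (0, initA l r)).2 i) ∧
      0 ≤ ((List.range i).foldl
        (fun st i' => (List.range r.length).foldl (stepA l r i') st) (0, initA l r)).1 ∧
      (∀ a b, a < i → b < r.length → runLen l r (a+1) (b+1) ≤ ((List.range i).foldl
        (fun st i' => (List.range r.length).foldl (stepA l r i') st) (0, initA l r)).1) ∧
      (((List.range i).foldl
        (fun st i' => (List.range r.length).foldl (stepA l r i') st) (0, initA l r)).1 = 0 ∨
        ∃ a b, a < i ∧ b < r.length ∧ ((List.range i).foldl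
          (fun st i' => (List.range r.length).foldl (stepA l r i') st) (0, initA l r)).1
            = runLen l r (a+1) (b+1)) := by
  intro i
  induction i with
  | zero =>
    intro _
    simp only [List.range_zero, List.foldl_nil]
    refine ⟨initA_shape l r, initA_matFull l r, le_refl _, ?_, Or.inl (by trivial)⟩
    intro a b ha hb
    exact absurd ha (by omega)
  | succ i ih =>
    intro hi1
    have hin : i < l.length := by omega
    obtain ⟨ISH, IMF, IMO, ILB, IATT⟩ := ih (by omega)
    set st := (List.range i).foldl
      (fun st i' => (List.range r.length).foldl (stepA l r i') st) (0, initA l r) with hst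
    rw [List.range_succ, List.foldl_append, List.foldl_cons, List.foldl_nil]
    obtain ⟨JSH, JMP, JMO, JLB, JATT⟩ :=
      A_inner l r i hin st.1 st.2 IMO ISH IMF r.length (le_refl _)
    refine ⟨JSH, matPart_matFull JMP, le_trans IMO JMO, ?_, ?_⟩
    · intro a b ha hb
      by_cases hai : a < i
      · exact le_trans (ILB a b hai hb) JMO
      · have ha' : a = i := by omega
        rw [ha']
        exact JLB b hb
    · rcases JATT with h' | ⟨b, hb, h'⟩
      · rw [h']
        rcases IATT with h'' | ⟨a, b, ha, hb, h''⟩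
        · exact Or.inl h''
        · exact Or.inr ⟨a, b, by omega, hb, h''⟩
      · exact Or.inr ⟨i, b, by omega, hb, h'⟩

theorem lcsA_isLCS (l r : List Char) : IsLCS l r (lcsA l r) := by
  obtain ⟨_, _, hmo, hlb, hatt⟩ := A_outer l r l.length (le_refl _)
  rw [lcsA_unfold]
  exact ⟨hmo, fun i j hi hj => hlb i j hi hj, hatt⟩

-- ===== B-side proofs =====

def stepB (l r : List Char) (d : Int) (st : Int × Int) (j : Nat) : Int × Int :=
  if 0 ≤ d + (j:Int) ∧ d + (j:Int) < (l.length : Int) ∧ l.getD (d + (j:Int)).toNat ' ' = r.getD j ' ' then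
    (max st.1 (st.2 + 1), st.2 + 1)
  else (st.1, 0)

theorem lcsB_unfold (l r : List Char) :
    lcsB l r = (PySem.List.pyRange (1 - (r.length : Int)) (l.length : Int) 1).foldl
      (fun best d => ((List.range r.length).foldl (stepB l r d) (best, 0)).1) 0 := rfl

-- the run counter B maintains on diagonal d, after j inner steps
def Rrun (l r : List Char) (d : Int) : Nat → Int
  | 0 => 0
  | j+1 =>
    if 0 ≤ d + (j:Int) ∧ d + (j:Int) < (l.length : Int) ∧ l.getD (d + (j:Int)).toNat ' ' = r.getD j ' ' then
      Rrun l r d j + 1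
    else 0

theorem Rrun_succ (l r : List Char) (d : Int) (j : Nat) :
    Rrun l r d (j+1) =
      (if 0 ≤ d + (j:Int) ∧ d + (j:Int) < (l.length : Int) ∧ l.getD (d + (j:Int)).toNat ' ' = r.getD j ' '
       then Rrun l r d j + 1 else 0) := rfl

theorem Rrun_eq_runLen (l r : List Char) (d : Int) :
    ∀ j : Nat, 0 ≤ d + (j:Int) → d + (j:Int) < (l.length : Int) →
      Rrun l r d (j+1) = runLen l r ((d + (j:Int)).toNat + 1) (j+1) := by
  intro j
  induction j with
  | zero =>
    intro h0 hn
    rw [Rrun_succ, runLen_succ]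
    by_cases hch : l.getD (d + ((0:Nat):Int)).toNat ' ' = r.getD 0 ' '
    · rw [if_pos ⟨h0, hn, hch⟩, if_pos hch]
      rw [Rrun, runLen_zero_right]
    · rw [if_neg (fun h => hch h.2.2), if_neg hch]
  | succ j ih =>
    intro h0 hn
    rw [Rrun_succ, runLen_succ]
    by_cases hch : l.getD (d + ((j+1:Nat):Int)).toNat ' ' = r.getD (j+1) ' '
    · rw [if_pos ⟨h0, hn, hch⟩, if_pos hch]
      congr 1
      by_cases hd : 0 ≤ d + (j:Int)
      · have hn' : d + (j:Int) < (l.length : Int) := by push_cast at hn ⊢; omega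
        rw [ih hd hn']
        have hidx : (d + ((j+1:Nat):Int)).toNat = (d + (j:Int)).toNat + 1 := by
          push_cast
          omega
        rw [hidx]
      · have hz : (d + ((j+1:Nat):Int)).toNat = 0 := by
          push_cast at h0 ⊢
          omega
        rw [hz]
        have hR : runLen l r 0 (j+1) = 0 := rfl
        rw [hR, Rrun_succ, if_neg (fun h => hd h.1)]
    · rw [if_neg (fun h => hch h.2.2), if_neg hch]

theorem B_inner (l r : List Char) (d : Int) (b0 : Int) (hb0 : 0 ≤ b0) :
    ∀ j, j ≤ r.length →
      ((List.range j).foldl (stepB l r d) (b0, 0)).2 = Rrun l r d j ∧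
      b0 ≤ ((List.range j).foldl (stepB l r d) (b0, 0)).1 ∧
      Rrun l r d j ≤ ((List.range j).foldl (stepB l r d) (b0, 0)).1 ∧
      (((List.range j).foldl (stepB l r d) (b0, 0)).1 = b0 ∨
        ∃ a b, a < l.length ∧ b < r.length ∧
          ((List.range j).foldl (stepB l r d) (b0, 0)).1 = runLen l r (a+1) (b+1)) := by
  intro j
  induction j with
  | zero =>
    intro _
    simp only [List.range_zero, List.foldl_nil]
    exact ⟨rfl, le_refl _, hb0, Or.inl (by trivial)⟩
  | succ j ih =>
    intro hj1
    have hjm : j < r.length := by omega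
    obtain ⟨IR, IMO, IRL, IATT⟩ := ih (by omega)
    set st := (List.range j).foldl (stepB l r d) (b0, 0) with hst
    rw [List.range_succ, List.foldl_append, List.foldl_cons, List.foldl_nil]
    by_cases hc : 0 ≤ d + (j:Int) ∧ d + (j:Int) < (l.length : Int) ∧
        l.getD (d + (j:Int)).toNat ' ' = r.getD j ' '
    · have hstep : stepB l r d st j = (max st.1 (st.2 + 1), st.2 + 1) := by
        simp only [stepB]
        rw [if_pos hc]
      rw [hstep]
      dsimp only
      have hR : Rrun l r d (j+1) = Rrun l r d j + 1 := by
        rw [Rrun_succ, if_pos hc]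
      have hRrl : Rrun l r d (j+1) = runLen l r ((d + (j:Int)).toNat + 1) (j+1) :=
        Rrun_eq_runLen l r d j hc.1 hc.2.1
      refine ⟨by rw [IR, hR], le_trans IMO (le_max_left _ _), ?_, ?_⟩
      · rw [hR, ← IR]
        exact le_max_right _ _
      · rcases max_choice st.1 (st.2 + 1) with h' | h'
        · rw [h']
          exact IATT
        · rw [h', IR, ← hR, hRrl]
          refine Or.inr ⟨(d + (j:Int)).toNat, j, ?_, hjm, rfl⟩
          omega
    · have hstep : stepB l r d st j = (st.1, 0) := by
        simp only [stepB]
        rw [if_neg hc]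
      rw [hstep]
      dsimp only
      have hR : Rrun l r d (j+1) = 0 := by
        rw [Rrun_succ, if_neg hc]
      exact ⟨hR.symm, IMO, by rw [hR]; exact le_trans hb0 IMO, IATT⟩

theorem B_fst_mono (l r : List Char) (d : Int) :
    ∀ (L : List Nat) (st : Int × Int), st.1 ≤ (L.foldl (stepB l r d) st).1 := by
  intro L
  induction L with
  | nil => intro st; simp
  | cons x L ih =>
    intro st
    refine le_trans ?_ (ih (stepB l r d st x))
    simp only [stepB]
    split
    · exact le_max_left _ _
    · exact le_refl _

def innerB (l r : List Char) (d : Int) (b : Int) : Int :=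
  ((List.range r.length).foldl (stepB l r d) (b, 0)).1

theorem innerB_ge_cell (l r : List Char) (a b : Nat) (ha : a < l.length) (hb : b < r.length)
    (b0 : Int) (hb0 : 0 ≤ b0) :
    runLen l r (a+1) (b+1) ≤ innerB l r ((a:Int) - (b:Int)) b0 := by
  set d : Int := (a:Int) - (b:Int) with hd
  have hsplit : List.range r.length =
      List.range (b+1) ++ (List.range (r.length - (b+1))).map (fun x => (b+1) + x) := by
    rw [← List.range_add]
    congr 1
    omega
  have h0 : 0 ≤ d + (b:Int) := by omega
  have hn : d + (b:Int) < (l.length : Int) := by omega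
  have htn : (d + (b:Int)).toNat = a := by omega
  obtain ⟨IR, IMO, IRL, IATT⟩ := B_inner l r d b0 hb0 (b+1) (by omega)
  have hrl : runLen l r (a+1) (b+1) ≤ ((List.range (b+1)).foldl (stepB l r d) (b0, 0)).1 := by
    have h' := Rrun_eq_runLen l r d b h0 hn
    rw [htn] at h'
    rw [← h']
    exact IRL
  unfold innerB
  rw [hsplit, List.foldl_append]
  exact le_trans hrl (B_fst_mono l r d _ _)

theorem innerB_mono (l r : List Char) (d : Int) (b : Int) : b ≤ innerB l r d b :=
  B_fst_mono l r d (List.range r.length) (b, 0)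

theorem innerB_att (l r : List Char) (d : Int) (b : Int) (hb : 0 ≤ b) :
    innerB l r d b = b ∨
      ∃ a c, a < l.length ∧ c < r.length ∧ innerB l r d b = runLen l r (a+1) (c+1) :=
  (B_inner l r d b hb r.length (le_refl _)).2.2.2

theorem B_outer_mono (l r : List Char) :
    ∀ (L : List Int) (b : Int), b ≤ L.foldl (fun best d => innerB l r d best) b := by
  intro L
  induction L with
  | nil => intro b; simp
  | cons d L ih =>
    intro b
    exact le_trans (innerB_mono l r d b) (ih _)

theorem B_outer_att (l r : List Char) :
    ∀ (L : List Int) (b : Int), 0 ≤ b →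
      (b = 0 ∨ ∃ a c, a < l.length ∧ c < r.length ∧ b = runLen l r (a+1) (c+1)) →
      (L.foldl (fun best d => innerB l r d best) b = 0 ∨
        ∃ a c, a < l.length ∧ c < r.length ∧
          L.foldl (fun best d => innerB l r d best) b = runLen l r (a+1) (c+1)) := by
  intro L
  induction L with
  | nil => intro b _ h; simpa using h
  | cons d L ih =>
    intro b hb hP
    simp only [List.foldl_cons]
    refine ih _ (le_trans hb (innerB_mono l r d b)) ?_
    rcases innerB_att l r d b hb with h' | h'
    · rw [h']; exact hP
    · exact Or.inr h'

theorem B_outer_ge (l r : List Char) (d0 : Int) (c : Int)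
    (hc : ∀ b, 0 ≤ b → c ≤ innerB l r d0 b) :
    ∀ (L : List Int) (b : Int), 0 ≤ b → d0 ∈ L →
      c ≤ L.foldl (fun best d => innerB l r d best) b := by
  intro L
  induction L with
  | nil => intro b _ h; simp at h
  | cons d L ih =>
    intro b hb hmem
    simp only [List.foldl_cons]
    by_cases hd : d = d0
    · rw [hd]
      exact le_trans (hc b hb) (B_outer_mono l r L _)
    · have hmem' : d0 ∈ L := by
        rcases List.mem_cons.mp hmem with h' | h'
        · exact absurd h'.symm hd
        · exact h'
      exact ih _ (le_trans hb (innerB_mono l r d b)) hmem'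

theorem lcsB_isLCS (l r : List Char) : IsLCS l r (lcsB l r) := by
  rw [lcsB_unfold]
  have heq : (PySem.List.pyRange (1 - (r.length : Int)) (l.length : Int) 1).foldl
      (fun best d => ((List.range r.length).foldl (stepB l r d) (best, 0)).1) 0 =
      (PySem.List.pyRange (1 - (r.length : Int)) (l.length : Int) 1).foldl
      (fun best d => innerB l r d best) 0 := rfl
  rw [heq]
  refine ⟨B_outer_mono l r _ 0, ?_, ?_⟩
  · intro i j hi hj
    refine B_outer_ge l r ((i:Int) - (j:Int)) _ ?_ _ 0 (le_refl _) ?_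
    · intro b hb
      exact innerB_ge_cell l r i j hi hj b hb
    · rw [PySem.List.mem_pyRange_one]
      constructor
      · omega
      · omega
  · exact B_outer_att l r _ 0 (le_refl _) (Or.inl (by trivial))

theorem lcs_eq (l r : List Char) : lcsA l r = lcsB l r :=
  IsLCS_unique (lcsA_isLCS l r) (lcsB_isLCS l r)

-- ===== VERDICT (by name: the statement is the Claim_ definition above) =====
theorem worst_primer_adapter_complement_spec : Claim_equal_worst_primer_adapter_complement := by
  intro seq _
  unfold Spec_worst_primer_adapter_complement worst_primer_adapter_complement worst_primer_adapter_complement_alt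
  simp only [lcs_eq]
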